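-- pv_equiv track=rewrite | github.com/davidfstein/probegenerator | probegenerator/parseMultifasta.py | multifasta_to_sequence_list
-- ===== SOURCE A (Python) =====
-- from collections import namedtuple
--
-- def multifasta_to_sequence_list(multifasta):
--     FastaEntry = namedtuple('FastaEntry', 'name sequence')
--     entries = []
--     header_indices = [i for i in range(0,len(multifasta)) if is_header(multifasta[i])]
--     for i in range(0, len(header_indices)):
--         if i == len(header_indices) - 1:
--             seq = concat_lines(multifasta[header_indices[i] + 1:])
--             gene_name = gene_name_from_header(multifasta[header_indices[i]]).strip('\n')
--             entries.append(FastaEntry(name=gene_name, sequence=seq))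
--         else:
--             header_index = header_indices[i]
--             next_header_index = header_indices[i+1]
--             seq = concat_lines(multifasta[header_index + 1:next_header_index])
--             gene_name = gene_name_from_header(multifasta[header_index]).strip('\n')
--             entries.append(FastaEntry(name=gene_name, sequence=seq))
--     return entries
--
-- def concat_lines(lines):
--     concatted_line = ''
--     for line in lines:
--         concatted_line += line
--     return concatted_line
--
-- def gene_name_from_header(line):
--     return line[1:].split(' ')[0]
--
-- def is_header(line):
--     return '>' in line
-- ===== SOURCE B (Python) =====
-- from collections import namedtuple
--
-- def multifasta_to_sequence_list(multifasta):
--     FastaEntry = namedtuple('FastaEntry', 'name sequence')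
--     entries = []
--     name = None
--     seq = ''
--     for line in multifasta:
--         if '>' in line:
--             if name is not None:
--                 entries.append(FastaEntry(name=name, sequence=seq))
--             name = line[1:].split(' ')[0].strip('\n')
--             seq = ''
--         elif name is not None:
--             seq += line
--     if name is not None:
--         entries.append(FastaEntry(name=name, sequence=seq))
--     return entries
-- ===== Notes on version B (the rewrite author's own statement) =====
-- stated objective: simpler
-- what changed: Replaced A's two-phase scheme (precompute all header indices, then re-slice the list between consecutive indices) by a single pass over the lines that carries the current entry's name and sequence accumulator and flushes it at each new header and at the end.
import Mathlib
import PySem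

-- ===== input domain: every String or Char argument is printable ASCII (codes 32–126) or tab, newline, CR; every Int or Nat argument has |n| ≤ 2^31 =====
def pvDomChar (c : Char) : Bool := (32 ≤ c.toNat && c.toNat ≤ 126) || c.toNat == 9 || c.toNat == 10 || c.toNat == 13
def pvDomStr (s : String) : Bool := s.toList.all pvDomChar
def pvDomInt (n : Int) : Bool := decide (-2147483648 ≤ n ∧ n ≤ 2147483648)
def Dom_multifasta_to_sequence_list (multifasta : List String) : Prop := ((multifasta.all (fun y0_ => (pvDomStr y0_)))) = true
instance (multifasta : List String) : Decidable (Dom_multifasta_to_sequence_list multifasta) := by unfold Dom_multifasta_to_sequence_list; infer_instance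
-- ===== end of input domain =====

-- B replaces A's precomputed header-index list and repeated slicing by a single pass that
-- carries the current entry (name, sequence accumulator); objective: a simpler one-pass decomposition.

-- ===== PORT A =====
-- shared helpers of the Python module, used by both programs
def pvIsHeader (line : String) : Bool := PySem.Str.isIn ">" line

def pvGeneNameFromHeader (line : String) : String :=
  ((PySem.Str.split? (PySem.Str.slice line (some 1) none) " ").getD []).headD ""

def pvConcatLines (lines : List String) : String :=
  lines.foldl (fun acc l => acc ++ l) ""

def multifasta_to_sequence_list (multifasta : List String) : List (String × String) :=
  let header_indices : List Int :=
    (PySem.List.pyRange 0 (multifasta.length : Int) 1).filter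
      (fun i => pvIsHeader (PySem.List.pyGetD multifasta i ""))
  (PySem.List.pyRange 0 (header_indices.length : Int) 1).foldl
    (fun entries i =>
      if i = (header_indices.length : Int) - 1 then
        let seq := pvConcatLines (PySem.List.slice multifasta
          (some (PySem.List.pyGetD header_indices i 0 + 1)) none)
        let gene_name := PySem.Str.stripChars
          (pvGeneNameFromHeader (PySem.List.pyGetD multifasta (PySem.List.pyGetD header_indices i 0) "")) "\n"
        entries ++ [(gene_name, seq)]
      else
        let header_index := PySem.List.pyGetD header_indices i 0
        let next_header_index := PySem.List.pyGetD header_indices (i + 1) 0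
        let seq := pvConcatLines (PySem.List.slice multifasta
          (some (header_index + 1)) (some next_header_index))
        let gene_name := PySem.Str.stripChars
          (pvGeneNameFromHeader (PySem.List.pyGetD multifasta header_index "")) "\n"
        entries ++ [(gene_name, seq)]) []

-- ===== PORT B =====
def pvGName (line : String) : String :=
  PySem.Str.stripChars (pvGeneNameFromHeader line) "\n"

-- the single pass once the first header has been seen: nm/sq is the open entry
def pvAltGo : List String → String → String → List (String × String)
  | [], nm, sq => [(nm, sq)]
  | l :: ls, nm, sq =>
    if pvIsHeader l then (nm, sq) :: pvAltGo ls (pvGName l) ""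
    else pvAltGo ls nm (sq ++ l)

def multifasta_to_sequence_list_alt : List String → List (String × String)
  | [] => []
  | l :: ls =>
    if pvIsHeader l then pvAltGo ls (pvGName l) ""
    else multifasta_to_sequence_list_alt ls

-- ===== PRECONDITION & SPEC =====
def Spec_multifasta_to_sequence_list (multifasta : List String) (out : List (String × String)) : Prop := out = multifasta_to_sequence_list_alt multifasta
instance (multifasta : List String) (out : List (String × String)) : Decidable (Spec_multifasta_to_sequence_list multifasta out) := by unfold Spec_multifasta_to_sequence_list; infer_instance

-- ===== CLAIM (what is proved, stated in full; the proofs are below) =====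
def Claim_equal_multifasta_to_sequence_list : Prop := ∀ (multifasta : List String), Dom_multifasta_to_sequence_list multifasta → Spec_multifasta_to_sequence_list multifasta (multifasta_to_sequence_list multifasta)

-- ===== LEMMAS AND PROOFS =====

-- header positions of the lines, as a list of Nat indices
def pvHp : List String → List Nat
  | [] => []
  | l :: ls => if pvIsHeader l then 0 :: (pvHp ls).map (· + 1) else (pvHp ls).map (· + 1)

-- A's entry list, re-expressed over the Nat header positions
def pvEntN (xs : List String) : List Nat → List (String × String)
  | [] => []
  | [p] => [(pvGName (xs.getD p ""), pvConcatLines (xs.drop (p + 1)))]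
  | p :: q :: rest =>
    (pvGName (xs.getD p ""), pvConcatLines ((xs.drop (p + 1)).take (q - (p + 1))))
      :: pvEntN xs (q :: rest)

lemma pv_range_filter (xs : List String) :
    (List.range xs.length).filter (fun i => pvIsHeader (xs.getD i "")) = pvHp xs := by
  induction xs with
  | nil => simp [pvHp]
  | cons l ls ih =>
    rw [List.length_cons, List.range_succ_eq_map, List.filter_cons, List.filter_map]
    have h2 : List.filter ((fun i => pvIsHeader ((l :: ls).getD i "")) ∘ Nat.succ)
        (List.range ls.length) = pvHp ls := by
      rw [← ih]; apply List.filter_congr; intro i _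
      simp [Function.comp]
    rw [h2, List.getD_cons_zero]
    by_cases h : pvIsHeader l = true <;> simp [pvHp, h]

-- A's filtered index list is pvHp, cast to Int
lemma pv_header_indices (xs : List String) :
    (PySem.List.pyRange 0 (xs.length : Int) 1).filter
      (fun i => pvIsHeader (PySem.List.pyGetD xs i "")) =
    (pvHp xs).map (fun p : Nat => (p : Int)) := by
  rw [PySem.List.pyRange_zero_natCast, List.filter_map, ← pv_range_filter]
  have h : ∀ i ∈ List.range xs.length,
      ((fun i => pvIsHeader (PySem.List.pyGetD xs i "")) ∘ (fun k : Nat => (k : Int))) i =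
      (fun i => pvIsHeader (xs.getD i "")) i := by
    intro i _; simp [PySem.List.pyGetD_natCast]
  rw [List.filter_congr h]

-- the entry A's loop appends at index i, as a plain function (the lets of the body inlined)
def pvF (xs : List String) (H : List Int) (i : Int) : String × String :=
  if i = (H.length : Int) - 1 then
    (PySem.Str.stripChars (pvGeneNameFromHeader (PySem.List.pyGetD xs (PySem.List.pyGetD H i 0) "")) "\n",
     pvConcatLines (PySem.List.slice xs (some (PySem.List.pyGetD H i 0 + 1)) none))
  else
    (PySem.Str.stripChars (pvGeneNameFromHeader (PySem.List.pyGetD xs (PySem.List.pyGetD H i 0) "")) "\n",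
     pvConcatLines (PySem.List.slice xs (some (PySem.List.pyGetD H i 0 + 1))
       (some (PySem.List.pyGetD H (i + 1) 0))))

lemma pvF_succ (xs : List String) (a : Int) (H : List Int) (k : Nat) :
    pvF xs (a :: H) ((k + 1 : Nat) : Int) = pvF xs H ((k : Nat) : Int) := by
  unfold pvF
  have hc : (((k + 1 : Nat) : Int) = ((a :: H).length : Int) - 1) ↔
      (((k : Nat) : Int) = (H.length : Int) - 1) := by
    simp only [List.length_cons]; push_cast; constructor <;> intro h <;> omega
  have e1 : PySem.List.pyGetD (a :: H) ((k + 1 : Nat) : Int) 0 =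
      PySem.List.pyGetD H ((k : Nat) : Int) 0 := by
    rw [PySem.List.pyGetD_natCast, PySem.List.pyGetD_natCast]; exact List.getD_cons_succ ..
  have e2 : PySem.List.pyGetD (a :: H) (((k + 1 : Nat) : Int) + 1) 0 =
      PySem.List.pyGetD H (((k : Nat) : Int) + 1) 0 := by
    rw [show (((k + 1 : Nat) : Int) + 1) = ((k + 2 : Nat) : Int) from by push_cast; ring,
      show (((k : Nat) : Int) + 1) = ((k + 1 : Nat) : Int) from by push_cast; ring,
      PySem.List.pyGetD_natCast, PySem.List.pyGetD_natCast]
    exact List.getD_cons_succ ..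
  rw [e1, e2]
  exact if_congr hc rfl rfl

lemma pv_map_range (xs : List String) (ps : List Nat) :
    (PySem.List.pyRange 0 (ps.length : Int) 1).map (pvF xs (ps.map (fun p : Nat => (p : Int)))) =
      pvEntN xs ps := by
  induction ps with
  | nil =>
    rw [show ((([] : List Nat).length : Int)) = ((0 : Nat) : Int) from by simp,
      PySem.List.pyRange_zero_natCast]
    simp [pvEntN]
  | cons p ps ih =>
    cases ps with
    | nil =>
      rw [show ((([p] : List Nat).length : Int)) = ((1 : Nat) : Int) from by simp,
        PySem.List.pyRange_zero_natCast]
      simp only [List.range_one, List.map_cons, List.map_nil]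
      have hF : pvF xs [(p : Int)] ((0 : Nat) : Int) =
          (pvGName (xs.getD p ""), pvConcatLines (xs.drop (p + 1))) := by
        rw [pvF, if_pos (by simp)]
        have g0 : PySem.List.pyGetD [(p : Int)] ((0 : Nat) : Int) 0 = (p : Int) := by
          rw [PySem.List.pyGetD_natCast]; rfl
        rw [g0, show ((p : Int) + 1) = ((p + 1 : Nat) : Int) from by push_cast; ring,
          PySem.List.slice_from_natCast, PySem.List.pyGetD_natCast]
        simp [pvGName]
      rw [hF]
      simp [pvEntN]
    | cons q rest =>
      rw [show (((p :: q :: rest : List Nat).length : Int)) = ((rest.length + 2 : Nat) : Int) from by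
          push_cast [List.length_cons]; omega,
        PySem.List.pyRange_zero_natCast, List.range_succ_eq_map]
      simp only [List.map_cons, List.map_map]
      have hhead : pvF xs ((p : Int) :: (q : Int) :: rest.map (fun p : Nat => (p : Int))) ((0 : Nat) : Int) =
          (pvGName (xs.getD p ""), pvConcatLines ((xs.drop (p + 1)).take (q - (p + 1)))) := by
        rw [pvF, if_neg (by intro hcon; simp [List.length_map, List.length_cons] at hcon; omega)]
        have g0 : PySem.List.pyGetD ((p : Int) :: (q : Int) :: rest.map (fun p : Nat => (p : Int))) ((0 : Nat) : Int) 0 = (p : Int) := by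
          rw [PySem.List.pyGetD_natCast]; rfl
        have g1 : PySem.List.pyGetD ((p : Int) :: (q : Int) :: rest.map (fun p : Nat => (p : Int))) (((0 : Nat) : Int) + 1) 0 = (q : Int) := by
          rw [show (((0 : Nat) : Int) + 1) = ((1 : Nat) : Int) from by norm_num,
            PySem.List.pyGetD_natCast]; rfl
        rw [g0, g1, show ((p : Int) + 1) = ((p + 1 : Nat) : Int) from by push_cast; ring,
          PySem.List.slice_natCast, PySem.List.pyGetD_natCast]
        simp [pvGName]
      have ih' : List.map ((pvF xs ((q : Int) :: rest.map (fun p : Nat => (p : Int)))) ∘ (fun p : Nat => (p : Int)))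
            (List.range (rest.length + 1)) = pvEntN xs (q :: rest) := by
        simp only [List.map_cons] at ih
        rw [← ih, show (((q :: rest : List Nat).length : Int)) = ((rest.length + 1 : Nat) : Int) from by
            push_cast [List.length_cons]; omega,
          PySem.List.pyRange_zero_natCast, List.map_map]
      have htail : List.map ((pvF xs ((p : Int) :: (q : Int) :: rest.map (fun p : Nat => (p : Int)))) ∘ ((fun p : Nat => (p : Int)) ∘ Nat.succ))
            (List.range (rest.length + 1)) = pvEntN xs (q :: rest) := by
        rw [← ih']
        apply List.map_congr_left
        intro k _
        show pvF xs _ ((Nat.succ k : Nat) : Int) = pvF xs _ ((k : Nat) : Int)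
        exact pvF_succ xs (p : Int) ((q : Int) :: rest.map (fun p : Nat => (p : Int))) k
      rw [hhead, htail]
      simp only [pvEntN]

-- A's loop over the header indices computes pvEntN
lemma pv_loop (xs : List String) (ps : List Nat) :
    (PySem.List.pyRange 0 (((ps.map (fun p : Nat => (p : Int))).length : Int)) 1).foldl
      (fun entries i =>
        if i = (((ps.map (fun p : Nat => (p : Int))).length : Int)) - 1 then
          let seq := pvConcatLines (PySem.List.slice xs
            (some (PySem.List.pyGetD (ps.map (fun p : Nat => (p : Int))) i 0 + 1)) none)
          let gene_name := PySem.Str.stripChars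
            (pvGeneNameFromHeader (PySem.List.pyGetD xs (PySem.List.pyGetD (ps.map (fun p : Nat => (p : Int))) i 0) "")) "\n"
          entries ++ [(gene_name, seq)]
        else
          let header_index := PySem.List.pyGetD (ps.map (fun p : Nat => (p : Int))) i 0
          let next_header_index := PySem.List.pyGetD (ps.map (fun p : Nat => (p : Int))) (i + 1) 0
          let seq := pvConcatLines (PySem.List.slice xs
            (some (header_index + 1)) (some next_header_index))
          let gene_name := PySem.Str.stripChars
            (pvGeneNameFromHeader (PySem.List.pyGetD xs header_index "")) "\n"
          entries ++ [(gene_name, seq)]) [] = pvEntN xs ps := by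
  have hb : (fun (entries : List (String × String)) (i : Int) =>
      if i = (((ps.map (fun p : Nat => (p : Int))).length : Int)) - 1 then
        let seq := pvConcatLines (PySem.List.slice xs
          (some (PySem.List.pyGetD (ps.map (fun p : Nat => (p : Int))) i 0 + 1)) none)
        let gene_name := PySem.Str.stripChars
          (pvGeneNameFromHeader (PySem.List.pyGetD xs (PySem.List.pyGetD (ps.map (fun p : Nat => (p : Int))) i 0) "")) "\n"
        entries ++ [(gene_name, seq)]
      else
        let header_index := PySem.List.pyGetD (ps.map (fun p : Nat => (p : Int))) i 0
        let next_header_index := PySem.List.pyGetD (ps.map (fun p : Nat => (p : Int))) (i + 1) 0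
        let seq := pvConcatLines (PySem.List.slice xs
          (some (header_index + 1)) (some next_header_index))
        let gene_name := PySem.Str.stripChars
          (pvGeneNameFromHeader (PySem.List.pyGetD xs header_index "")) "\n"
        entries ++ [(gene_name, seq)]) =
      (fun (entries : List (String × String)) (i : Int) =>
        entries ++ [pvF xs (ps.map (fun p : Nat => (p : Int))) i]) := by
    funext entries i
    simp only [List.length_map]
    by_cases hc : i = ((ps.length : Int)) - 1 <;> simp [pvF, List.length_map, hc]
  rw [hb, PySem.List.foldl_append_singleton_eq_map, List.nil_append, List.length_map,
    pv_map_range]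

-- shifting every position by one undoes a cons on the lines
lemma pv_shift (l : String) (ls : List String) (ps : List Nat) :
    pvEntN (l :: ls) (ps.map (· + 1)) = pvEntN ls ps := by
  induction ps with
  | nil => simp [pvEntN]
  | cons p ps ih =>
    cases ps with
    | nil => simp [pvEntN, List.drop_succ_cons]
    | cons q rest =>
      have harith : q + 1 - (p + 1 + 1) = q - (p + 1) := by omega
      simp only [List.map_cons] at ih ⊢
      simp [pvEntN, List.drop_succ_cons, harith] at ih ⊢
      exact ih

-- the pass over a header-free tail closes the open entry
lemma pv_go_nohdr (ls : List String) (nm sq : String) (h : pvHp ls = []) :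
    pvAltGo ls nm sq = [(nm, ls.foldl (fun acc l => acc ++ l) sq)] := by
  induction ls generalizing nm sq with
  | nil => simp [pvAltGo]
  | cons x t ih =>
    by_cases hh : pvIsHeader x = true
    · simp [pvHp, hh] at h
    · simp only [pvHp, hh, Bool.false_eq_true, ite_false, List.map_eq_nil_iff] at h
      simp [pvAltGo, hh, ih _ _ h]

-- the pass up to the first header of the tail emits the open entry, then proceeds like alt
lemma pv_go_hdr (ls : List String) (nm sq : String) (q : Nat) (rest : List Nat)
    (h : pvHp ls = q :: rest) :
    pvAltGo ls nm sq =
      (nm, (ls.take q).foldl (fun acc l => acc ++ l) sq) :: multifasta_to_sequence_list_alt ls := by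
  induction ls generalizing nm sq q rest with
  | nil => simp [pvHp] at h
  | cons x t ih =>
    by_cases hh : pvIsHeader x = true
    · simp only [pvHp, hh, ite_true] at h
      obtain ⟨hq, -⟩ := List.cons.inj h
      subst hq
      simp [pvAltGo, multifasta_to_sequence_list_alt, hh]
    · simp only [pvHp, hh, Bool.false_eq_true, ite_false] at h
      obtain ⟨q', t', ht', hq, hrest⟩ := List.map_eq_cons_iff.mp h
      subst hq
      simp only [pvAltGo, hh, Bool.false_eq_true, ite_false]
      rw [ih _ _ _ _ (by rw [ht'])]
      simp [multifasta_to_sequence_list_alt, hh, List.take_succ_cons]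

lemma pv_main (xs : List String) :
    pvEntN xs (pvHp xs) = multifasta_to_sequence_list_alt xs := by
  induction xs with
  | nil => simp [pvHp, pvEntN, multifasta_to_sequence_list_alt]
  | cons l ls ih =>
    by_cases hh : pvIsHeader l = true
    · cases hq : pvHp ls with
      | nil =>
        simp only [pvHp, hh, ite_true, hq, List.map_nil]
        rw [show multifasta_to_sequence_list_alt (l :: ls) = pvAltGo ls (pvGName l) "" from by
          simp [multifasta_to_sequence_list_alt, hh]]
        rw [pv_go_nohdr ls _ _ hq]
        simp [pvEntN, pvConcatLines]
      | cons q rest =>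
        simp only [pvHp, hh, ite_true, hq, List.map_cons]
        rw [show multifasta_to_sequence_list_alt (l :: ls) = pvAltGo ls (pvGName l) "" from by
          simp [multifasta_to_sequence_list_alt, hh]]
        rw [pv_go_hdr ls _ _ q rest hq]
        simp only [pvEntN]
        rw [show ((q + 1) :: List.map (· + 1) rest : List Nat) = List.map (· + 1) (q :: rest) from by simp]
        rw [pv_shift, ← hq, ih]
        simp [pvConcatLines]
    · simp only [pvHp, hh, Bool.false_eq_true, ite_false]
      rw [pv_shift, ih]
      simp [multifasta_to_sequence_list_alt, hh]

-- ===== VERDICT (by name: the statement is the Claim_ definition above) =====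
theorem multifasta_to_sequence_list_spec : Claim_equal_multifasta_to_sequence_list := by
  intro xs _
  unfold Spec_multifasta_to_sequence_list
  show multifasta_to_sequence_list xs = _
  unfold multifasta_to_sequence_list
  rw [pv_header_indices, pv_loop, pv_main]
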